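-- pv_equiv track=rewrite | github.com/DavoDC/RivalsVidMaker | scripts/once_off/analyse_ko_data.py | bucket_histogram
-- ===== SOURCE A (Python) =====
-- from collections import Counter, defaultdict
--
-- def bucket_histogram(values, bucket_size=5, max_val=60):
--     """Returns a list of (bucket_label, count) for a histogram."""
--     buckets = defaultdict(int)
--     for v in values:
--         b = int(v // bucket_size) * bucket_size
--         b = min(b, max_val - bucket_size)
--         buckets[b] += 1
--     result = []
--     for b in range(0, max_val, bucket_size):
--         label = f"{b}-{b + bucket_size}s"
--         result.append((label, buckets[b]))
--     return result
-- ===== SOURCE B (Python) =====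
-- def bucket_histogram(values, bucket_size=5, max_val=60):
--     """Returns a list of (bucket_label, count) for a histogram."""
--     cap = max_val - bucket_size
--     result = []
--     for b in range(0, max_val, bucket_size):
--         count = sum(1 for v in values if min(v // bucket_size * bucket_size, cap) == b)
--         result.append((f"{b}-{b + bucket_size}s", count))
--     return result
-- ===== Notes on version B (the rewrite author's own statement) =====
-- stated objective: simpler
-- what changed: Replaced the defaultdict counting pass followed by a lookup loop with a single loop over the output buckets that counts matching values on the fly, so no dictionary is built at all.
import Mathlib
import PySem

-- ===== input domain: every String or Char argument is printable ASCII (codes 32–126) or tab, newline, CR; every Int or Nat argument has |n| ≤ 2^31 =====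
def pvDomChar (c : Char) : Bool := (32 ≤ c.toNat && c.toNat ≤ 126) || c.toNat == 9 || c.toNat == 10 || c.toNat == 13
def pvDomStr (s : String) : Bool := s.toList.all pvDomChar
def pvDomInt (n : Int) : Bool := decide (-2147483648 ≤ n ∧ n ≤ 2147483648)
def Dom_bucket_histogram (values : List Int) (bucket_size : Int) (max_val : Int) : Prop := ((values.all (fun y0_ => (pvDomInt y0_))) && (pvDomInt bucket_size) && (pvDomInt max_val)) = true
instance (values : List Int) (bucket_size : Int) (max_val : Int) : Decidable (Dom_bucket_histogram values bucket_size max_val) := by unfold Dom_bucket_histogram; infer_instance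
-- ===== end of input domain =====

-- B replaces A's defaultdict-then-lookup with one loop over the buckets that counts values on the fly (objective: simpler).


-- ===== PORT A =====
def bucket_histogram (values : List Int) (bucket_size : Int) (max_val : Int) : List (String × Int) :=
  -- buckets = defaultdict(int); for v in values: b = int(v // bucket_size) * bucket_size; b = min(b, max_val - bucket_size); buckets[b] += 1
  let buckets : PySem.Dict Int Int := values.foldl (fun d v =>
    let b := PySem.Int.floordiv v bucket_size * bucket_size
    let b := min b (max_val - bucket_size)
    d.modify b 0 (· + 1)) PySem.Dict.empty
  -- for b in range(0, max_val, bucket_size): result.append((f"{b}-{b+bucket_size}s", buckets[b]))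
  -- (defaultdict read buckets[b] returns 0 for an absent key: getD _ 0)
  (PySem.List.pyRange 0 max_val bucket_size).foldl (fun result b =>
    result ++ [(PySem.Int.toStr b ++ "-" ++ PySem.Int.toStr (b + bucket_size) ++ "s", buckets.getD b 0)]) []

-- ===== PORT B =====
def bucket_histogram_alt (values : List Int) (bucket_size : Int) (max_val : Int) : List (String × Int) :=
  let cap := max_val - bucket_size
  (PySem.List.pyRange 0 max_val bucket_size).foldl (fun result b =>
    -- count = sum(1 for v in values if min(v // bucket_size * bucket_size, cap) == b)
    let count : Int := values.foldl (fun acc v =>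
      if min (PySem.Int.floordiv v bucket_size * bucket_size) cap = b then acc + 1 else acc) 0
    result ++ [(PySem.Int.toStr b ++ "-" ++ PySem.Int.toStr (b + bucket_size) ++ "s", count)]) []

-- ===== PRECONDITION & SPEC =====
-- Pre_ excludes exactly bucket_size = 0, where Python A raises (ZeroDivisionError on v // 0, or ValueError from range(0, max_val, 0)).
def Pre_bucket_histogram (values : List Int) (bucket_size : Int) (max_val : Int) : Prop := bucket_size ≠ 0
instance (values : List Int) (bucket_size : Int) (max_val : Int) : Decidable (Pre_bucket_histogram values bucket_size max_val) := by unfold Pre_bucket_histogram; infer_instance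
def pvWitness_bucket_histogram : List Int × Int × Int := ([3, 7, 7, 12, 61], 5, 60)
def Spec_bucket_histogram (values : List Int) (bucket_size : Int) (max_val : Int) (out : List (String × Int)) : Prop := out = bucket_histogram_alt values bucket_size max_val
instance (values : List Int) (bucket_size : Int) (max_val : Int) (out : List (String × Int)) : Decidable (Spec_bucket_histogram values bucket_size max_val out) := by unfold Spec_bucket_histogram; infer_instance

-- ===== CLAIM (what is proved, stated in full; the proofs are below) =====
def Claim_equal_bucket_histogram : Prop := ∀ (values : List Int) (bucket_size : Int) (max_val : Int), Dom_bucket_histogram values bucket_size max_val → Pre_bucket_histogram values bucket_size max_val → Spec_bucket_histogram values bucket_size max_val (bucket_histogram values bucket_size max_val)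

-- ===== LEMMAS AND PROOFS =====

-- A's dict, looked up at any key, is the count of values landing in that bucket.
theorem bucket_count (values : List Int) (bucket_size max_val b : Int) :
    (values.foldl (fun d v =>
      d.modify (min (PySem.Int.floordiv v bucket_size * bucket_size) (max_val - bucket_size)) 0 (· + 1))
      (PySem.Dict.empty : PySem.Dict Int Int)).getD b 0
    = (values.countP (fun v => decide (min (PySem.Int.floordiv v bucket_size * bucket_size) (max_val - bucket_size) = b)) : Int) := by
  have h := List.foldl_map (f := fun v => min (PySem.Int.floordiv v bucket_size * bucket_size) (max_val - bucket_size))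
    (g := fun (d : PySem.Dict Int Int) x => d.modify x 0 (· + 1)) (l := values) (init := PySem.Dict.empty)
  rw [show (fun (d : PySem.Dict Int Int) v =>
        d.modify (min (PySem.Int.floordiv v bucket_size * bucket_size) (max_val - bucket_size)) 0 (· + 1))
      = (fun (d : PySem.Dict Int Int) v =>
        d.modify ((fun v => min (PySem.Int.floordiv v bucket_size * bucket_size) (max_val - bucket_size)) v) 0 (· + 1)) from rfl,
    ← h, PySem.Dict.getD_foldl_modify_add_one, PySem.Dict.getD_empty]
  rw [List.count_eq_countP, List.countP_map, Function.comp_def, Int.zero_add]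
  have hp : (fun x => min (PySem.Int.floordiv x bucket_size * bucket_size) (max_val - bucket_size) == b)
      = (fun v => decide (min (PySem.Int.floordiv v bucket_size * bucket_size) (max_val - bucket_size) = b)) := by
    funext x; exact Bool.beq_eq_decide_eq _ _
  rw [hp]


-- ===== VERDICT (by name: the statement is the Claim_ definition above) =====

theorem bucket_histogram_spec : Claim_equal_bucket_histogram := by
  intro values bucket_size max_val _ _
  unfold Spec_bucket_histogram bucket_histogram bucket_histogram_alt
  simp only [PySem.List.foldl_append_singleton_eq_map, List.nil_append]
  refine List.map_congr_left (fun b _ => ?_)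
  simp only [PySem.List.foldl_ite_add_one, Int.zero_add]
  rw [bucket_count]
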